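-- pv_equiv track=rewrite | github.com/IrandeMelo/saudeuece | streamlit_app.py | classify_journal
-- ===== SOURCE A (Python) =====
-- def map_quartil_to_level(q):
--     """
--     Converte Q1/Q2/Q3/Q4 em MB/B/R/F.
--     Retorna None se não for quartil válido.
--     """
--     if q is None:
--         return None
--     s = str(q).strip().upper()
--     if s == "Q1":
--         return "MB"
--     if s == "Q2":
--         return "B"
--     if s == "Q3":
--         return "R"
--     if s == "Q4":
--         return "F"
--     return None
--
-- def classify_journal(jcr_quartil, sjr_quartil):
--     """
--     - Se JCR = Q1 ou SJR = Q1 -> MB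
--     - Senão, se JCR = Q2 ou SJR = Q2 -> B
--     - Senão, se JCR = Q3 ou SJR = Q3 -> R
--     - Senão, se JCR = Q4 ou SJR = Q4 -> F
--     - Sem quartil válido -> SEM_CLASSIFICACAO_JCR_SJR
--     """
--     jcr_level = map_quartil_to_level(jcr_quartil)
--     sjr_level = map_quartil_to_level(sjr_quartil)
--
--     ordem = ["MB", "B", "R", "F"]
--     for lvl in ordem:
--         if jcr_level == lvl or sjr_level == lvl:
--             return lvl
--
--     return "SEM_CLASSIFICACAO_JCR_SJR"
-- ===== SOURCE B (Python) =====
-- def classify_journal(jcr_quartil, sjr_quartil):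
--     # Single accumulator pass: validate each input by SHAPE ("Q" + digit 1-4),
--     # keep the lexicographically smallest normalized string (works because
--     # "Q1" < "Q2" < "Q3" < "Q4" matches the priority order), and map only the
--     # winner to its level at the end.
--     best = None
--     for q in (jcr_quartil, sjr_quartil):
--         if q is None:
--             continue
--         s = str(q).strip().upper()
--         if len(s) == 2 and s[0] == "Q" and s[1] in ("1", "2", "3", "4"):
--             if best is None or s < best:
--                 best = s
--     if best is None:
--         return "SEM_CLASSIFICACAO_JCR_SJR"
--     return {"Q1": "MB", "Q2": "B", "Q3": "R", "Q4": "F"}[best]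
-- ===== Notes on version B (the rewrite author's own statement) =====
-- stated objective: simpler
-- what changed: A maps each input to a level and then priority-scans ['MB','B','R','F']; B never maps individual inputs: it validates by string shape ('Q'+digit 1-4), keeps the lexicographically smallest normalized string in a single accumulator pass (valid because 'Q1'<'Q2'<'Q3'<'Q4' is the priority order), and translates only the winner to its level once at the end.
import Mathlib
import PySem

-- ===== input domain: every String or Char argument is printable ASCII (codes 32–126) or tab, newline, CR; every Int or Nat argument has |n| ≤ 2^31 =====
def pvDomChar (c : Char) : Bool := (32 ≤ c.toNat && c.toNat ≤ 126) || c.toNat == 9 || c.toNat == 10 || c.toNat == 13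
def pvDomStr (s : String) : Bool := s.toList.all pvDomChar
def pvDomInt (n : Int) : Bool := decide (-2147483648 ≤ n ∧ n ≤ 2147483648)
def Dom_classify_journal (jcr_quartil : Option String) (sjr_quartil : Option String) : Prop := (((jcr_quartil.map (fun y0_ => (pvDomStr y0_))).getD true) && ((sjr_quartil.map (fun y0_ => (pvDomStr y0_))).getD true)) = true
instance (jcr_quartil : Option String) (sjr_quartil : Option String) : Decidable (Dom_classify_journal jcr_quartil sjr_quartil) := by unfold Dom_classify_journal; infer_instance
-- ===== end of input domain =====

-- B drops A's per-input level mapping and priority scan: it validates by shape, keeps the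
-- lexicographically smallest normalized string in one accumulator pass, and maps only the
-- winner to its level at the end (simpler decomposition, same values).

-- ===== PORT A =====
def map_quartil_to_level (q : Option String) : Option String :=
  match q with
  | none => none
  | some q =>
    let s := PySem.Str.upper (PySem.Str.strip q)
    if s = "Q1" then some "MB"
    else if s = "Q2" then some "B"
    else if s = "Q3" then some "R"
    else if s = "Q4" then some "F"
    else none

-- the 'for lvl in ordem' loop of A, as structural recursion over the list
def scanLevels (jl sl : Option String) : List String → String
  | [] => "SEM_CLASSIFICACAO_JCR_SJR"
  | lvl :: rest => if jl = some lvl ∨ sl = some lvl then lvl else scanLevels jl sl rest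

def classify_journal (jcr_quartil : Option String) (sjr_quartil : Option String) : String :=
  let jcr_level := map_quartil_to_level jcr_quartil
  let sjr_level := map_quartil_to_level sjr_quartil
  scanLevels jcr_level sjr_level ["MB", "B", "R", "F"]

-- ===== PORT B =====
-- Python's 's < t' on strings: code-point lexicographic comparison (exact; ported by hand,
-- PySem has no string-ordering primitive)
def pvStrLtB : List Char → List Char → Bool
  | [], [] => false
  | [], _ :: _ => true
  | _ :: _, [] => false
  | x :: xs, y :: ys => x < y || (x = y && pvStrLtB xs ys)

-- 'len(s) == 2 and s[0] == "Q" and s[1] in ("1", "2", "3", "4")'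
def pvShapeOK (s : String) : Bool :=
  PySem.Str.len s == 2 &&
  PySem.Str.pyGet? s 0 == some 'Q' &&
  (match PySem.Str.pyGet? s 1 with
   | some c => (["1", "2", "3", "4"] : List String).contains (String.ofList [c])
   | none => false)

-- 'if best is None or s < best: best = s'
def pvCombine (best : Option String) (s : String) : Option String :=
  match best with
  | none => some s
  | some b => if pvStrLtB s.toList b.toList then some s else some b

-- one iteration of B's 'for q in (jcr_quartil, sjr_quartil)' loop
def pvBestStep (best : Option String) (q : Option String) : Option String :=
  match q with
  | none => best
  | some q0 =>
    let s := PySem.Str.upper (PySem.Str.strip q0)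
    if pvShapeOK s then pvCombine best s else best

def classify_journal_alt (jcr_quartil : Option String) (sjr_quartil : Option String) : String :=
  match List.foldl pvBestStep none [jcr_quartil, sjr_quartil] with
  | none => "SEM_CLASSIFICACAO_JCR_SJR"
  | some b =>
    -- Python's dict[best]; best is always one of the four keys, so the default is unreachable
    (PySem.Dict.get? (PySem.Dict.ofList [("Q1", "MB"), ("Q2", "B"), ("Q3", "R"), ("Q4", "F")]) b).getD ""

-- ===== PRECONDITION & SPEC =====
def Spec_classify_journal (jcr_quartil : Option String) (sjr_quartil : Option String) (out : String) : Prop := out = classify_journal_alt jcr_quartil sjr_quartil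
instance (jcr_quartil : Option String) (sjr_quartil : Option String) (out : String) : Decidable (Spec_classify_journal jcr_quartil sjr_quartil out) := by unfold Spec_classify_journal; infer_instance

-- ===== CLAIM (what is proved, stated in full; the proofs are below) =====
def Claim_equal_classify_journal : Prop := ∀ (jcr_quartil : Option String) (sjr_quartil : Option String), Dom_classify_journal jcr_quartil sjr_quartil → Spec_classify_journal jcr_quartil sjr_quartil (classify_journal jcr_quartil sjr_quartil)

-- ===== LEMMAS AND PROOFS =====

-- B's shape test accepts exactly the four quartil strings
lemma shape_valid (u : String) (h : pvShapeOK u = true) :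
    u = "Q1" ∨ u = "Q2" ∨ u = "Q3" ∨ u = "Q4" := by
  unfold pvShapeOK at h
  simp only [Bool.and_eq_true, beq_iff_eq] at h
  obtain ⟨⟨hlen, hq⟩, hd⟩ := h
  have hlen2 : u.toList.length = 2 := by
    simp [PySem.Str.len_eq] at hlen; exact_mod_cast hlen
  obtain ⟨c0, c1, hl⟩ := List.length_eq_two.mp hlen2
  have hc0 : c0 = 'Q' := by
    simp [PySem.Str.pyGet?, PySem.List.pyGet?, PySem.List.pyIdx?, hl] at hq; exact hq
  have hget1 : PySem.Str.pyGet? u 1 = some c1 := by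
    simp [PySem.Str.pyGet?, PySem.List.pyGet?, PySem.List.pyIdx?, hl]
  rw [hget1] at hd
  simp only [List.contains_eq_mem, List.mem_cons, List.not_mem_nil, or_false,
    decide_eq_true_eq] at hd
  have hu : ∀ d : Char, String.ofList [c1] = String.ofList [d] → u = String.ofList ['Q', d] := by
    intro d hcd
    have : c1 = d := by
      have := congrArg String.toList hcd; simpa using this
    subst this
    have := congrArg String.ofList hl
    rwa [String.ofList_toList, hc0] at this
  rcases hd with hd | hd | hd | hd
  · exact Or.inl (hu '1' (by rw [hd]))
  · exact Or.inr (Or.inl (hu '2' (by rw [hd])))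
  · exact Or.inr (Or.inr (Or.inl (hu '3' (by rw [hd]))))
  · exact Or.inr (Or.inr (Or.inr (hu '4' (by rw [hd]))))

-- joint behaviour of A's level map and B's loop body on the same input
lemma cases5 (q : Option String) :
    (map_quartil_to_level q = none ∧ ∀ b, pvBestStep b q = b) ∨
    (map_quartil_to_level q = some "MB" ∧ ∀ b, pvBestStep b q = pvCombine b "Q1") ∨
    (map_quartil_to_level q = some "B" ∧ ∀ b, pvBestStep b q = pvCombine b "Q2") ∨
    (map_quartil_to_level q = some "R" ∧ ∀ b, pvBestStep b q = pvCombine b "Q3") ∨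
    (map_quartil_to_level q = some "F" ∧ ∀ b, pvBestStep b q = pvCombine b "Q4") := by
  cases q with
  | none => exact Or.inl ⟨rfl, fun b => rfl⟩
  | some a =>
    simp only [map_quartil_to_level, pvBestStep]
    generalize PySem.Str.upper (PySem.Str.strip a) = u
    by_cases hv : pvShapeOK u = true
    · rcases shape_valid u hv with h | h | h | h <;> subst h
      · exact Or.inr (Or.inl ⟨by decide, fun b => by rw [if_pos (by decide : pvShapeOK "Q1" = true)]⟩)
      · exact Or.inr (Or.inr (Or.inl ⟨by decide, fun b => by rw [if_pos (by decide : pvShapeOK "Q2" = true)]⟩))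
      · exact Or.inr (Or.inr (Or.inr (Or.inl ⟨by decide, fun b => by rw [if_pos (by decide : pvShapeOK "Q3" = true)]⟩)))
      · exact Or.inr (Or.inr (Or.inr (Or.inr ⟨by decide, fun b => by rw [if_pos (by decide : pvShapeOK "Q4" = true)]⟩)))
    · have h1 : u ≠ "Q1" := fun h => hv (by subst h; decide)
      have h2 : u ≠ "Q2" := fun h => hv (by subst h; decide)
      have h3 : u ≠ "Q3" := fun h => hv (by subst h; decide)
      have h4 : u ≠ "Q4" := fun h => hv (by subst h; decide)
      exact Or.inl ⟨by simp [h1, h2, h3, h4], fun b => by simp [hv]⟩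

-- ===== VERDICT (by name: the statement is the Claim_ definition above) =====
theorem classify_journal_spec : Claim_equal_classify_journal := by
  intro j s _
  unfold Spec_classify_journal
  simp only [classify_journal, classify_journal_alt, List.foldl]
  rcases cases5 j with hj | hj | hj | hj | hj <;>
    rcases cases5 s with hs | hs | hs | hs | hs <;>
      rw [hj.1, hs.1, hj.2, hs.2] <;> decide
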